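-- pv_equiv track=rewrite | github.com/ooici/marine-integrations | mi/instrument/teledyne/workhorse_adcp_5_beam_600khz/ooicore/util/ts_filter.py | _partial_match
-- ===== SOURCE A (Python) =====
-- def _partial_match(buffer, string, safe_size):
--     """
--     Helper to handle the possible edge case of a string partially
--     occurring at the end of buffer currently under analysis.
--
--     @param buffer buffer to inspect
--     @param string string to find
--     @param safe_size size of buffer suffix where the partial match is to be
--             attempted.
--
--     @retval A partition of the given buffer into two parts (send_buf, buf)
--             where:
--                send_buf: buffer that can be immediately sent out to receiver;
--                          can be '' meaning that more data is required to
--                          continue parsing for timestamp related tags.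
--                buf: continue analyzing this buffer.
--     """
--
--     # search string starting from this position:
--     start_pos = max(0, len(buffer) - safe_size)
--     pos = buffer.find(string, start_pos)
--     if pos >= 0:
--         # found completely:
--         retval = (buffer[0: pos], buffer[pos:])
--     else:
--         # try partial match:
--         prefix = string
--         while not buffer.startswith(prefix, len(buffer) - len(prefix)):
--             prefix = prefix[:len(prefix) - 1]
--
--         if prefix:
--             # there is a partial match:
--             retval = (buffer[0: -len(prefix)], buffer[-len(prefix):])
--         else:
--             retval = (buffer, '')
--
--     (send_buf, buf) = retval
--     assert buffer == send_buf + buf, "output must be partition of input"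
--     return retval
-- ===== SOURCE B (Python) =====
-- def _kmp_step(string, fail, c, k):
--     # advance KMP automaton state k by character c
--     m = len(string)
--     while k and (k == m or c != string[k]):
--         k = fail[k - 1]
--     if k < m and c == string[k]:
--         k += 1
--     return k
--
--
-- def _partial_match(buffer, string, safe_size):
--     start_pos = max(0, len(buffer) - safe_size)
--     pos = buffer.find(string, start_pos)
--     if pos >= 0:
--         return (buffer[0:pos], buffer[pos:])
--     # no full occurrence from start_pos: find the longest prefix of `string`
--     # that is a suffix of `buffer`, in one pass with the KMP failure function.
--     m = len(string)
--     fail = [0] * m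
--     k = 0
--     for i in range(1, m):
--         k = _kmp_step(string, fail, string[i], k)
--         fail[i] = k
--     k = 0
--     for c in buffer:
--         k = _kmp_step(string, fail, c, k)
--     n = len(buffer)
--     return (buffer[0:n - k], buffer[n - k:])
-- ===== Notes on version B (the rewrite author's own statement) =====
-- stated objective: faster
-- what changed: A finds the longest string-prefix that is a buffer suffix by repeatedly shrinking the prefix and re-testing with startswith (worst-case quadratic in len(string)); B computes it in one linear KMP pass: it builds the failure function of string once and runs the automaton over buffer, so no suffix test is ever repeated.
import Mathlib
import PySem

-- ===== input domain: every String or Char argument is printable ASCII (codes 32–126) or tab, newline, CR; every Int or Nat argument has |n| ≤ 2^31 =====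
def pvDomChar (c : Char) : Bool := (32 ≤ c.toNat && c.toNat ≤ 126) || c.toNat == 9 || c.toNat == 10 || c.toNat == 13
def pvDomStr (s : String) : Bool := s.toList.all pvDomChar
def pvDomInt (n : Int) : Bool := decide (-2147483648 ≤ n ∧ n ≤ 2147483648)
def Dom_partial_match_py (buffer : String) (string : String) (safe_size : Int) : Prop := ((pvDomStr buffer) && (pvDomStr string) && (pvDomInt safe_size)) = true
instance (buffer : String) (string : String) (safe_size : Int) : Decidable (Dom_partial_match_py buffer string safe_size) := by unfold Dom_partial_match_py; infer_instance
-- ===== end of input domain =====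

-- B replaces A's quadratic shrink-and-retest loop for the longest string-prefix that is a
-- buffer suffix by a single KMP failure-function pass (objective: faster, measured).

-- ===== PORT A =====

-- Python's s.startswith(p, start) with an int start (PySem.Chars.startswith has no start
-- parameter): a negative start is adjusted by +len(s) and clamped to 0, a start beyond
-- len(s) yields False, otherwise p is compared against s[start:]. Exact for every Int start.
def pyStartswithFrom (s p : List Char) (start : Int) : Bool :=
  let st : Int := if start < 0 then max 0 (start + s.length) else start
  if st ≤ (s.length : Int) then p.isPrefixOf (s.drop st.toNat) else false

-- 'while not buffer.startswith(prefix, len(buffer) - len(prefix)): prefix = prefix[:len(prefix)-1]'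
def aShrink (buf : List Char) (pre : List Char) : List Char :=
  if pyStartswithFrom buf pre ((buf.length : Int) - pre.length) then pre
  else aShrink buf (PySem.List.slice pre none (some ((pre.length : Int) - 1)))
termination_by pre.length
decreasing_by
  rename_i h
  cases pre with
  | nil => exact absurd (by simp [pyStartswithFrom]; split <;> omega) h
  | cons a l => simp

def partial_match_py (buffer : String) (string : String) (safe_size : Int) : String × String :=
  let buf := buffer.toList
  let s := string.toList
  let start_pos : Int := max 0 ((buf.length : Int) - safe_size)
  let pos := PySem.Chars.findFrom buf s start_pos none
  if pos ≥ 0 then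
    (String.ofList (PySem.List.slice buf (some 0) (some pos)),
     String.ofList (PySem.List.slice buf (some pos) none))
  else
    let pre := aShrink buf s
    if pre ≠ [] then
      (String.ofList (PySem.List.slice buf none (some (-(pre.length : Int)))),
       String.ofList (PySem.List.slice buf (some (-(pre.length : Int))) none))
    else
      (String.ofList buf, String.ofList [])
  -- A's final 'assert buffer == send_buf + buf' always holds and is not ported.

-- ===== PORT B =====

-- 'while k and (k == m or c != string[k]): k = fail[k - 1]'
def kmpFall (s : List Char) (fail : Array Nat) (c : Char) (k : Nat) : Nat :=
  if k ≠ 0 ∧ (k = s.length ∨ ¬ c = s.getD k default) then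
    if _h : fail.getD (k - 1) 0 < k then kmpFall s fail c (fail.getD (k - 1) 0)
    else fail.getD (k - 1) 0
    -- the dite guard is for totality only: every fail entry built below is < its index + 1
  else k
termination_by k
decreasing_by simpa using _h

-- _kmp_step(string, fail, c, k)
def kmpStep (s : List Char) (fail : Array Nat) (c : Char) (k : Nat) : Nat :=
  let k' := kmpFall s fail c k
  if k' < s.length ∧ c = s.getD k' default then k' + 1 else k'

-- 'fail = [0]*m; k = 0; for i in range(1, m): k = _kmp_step(...); fail[i] = k'
def buildFail (s : List Char) : Array Nat × Nat :=
  (PySem.List.pyRange 1 (s.length : Int) 1).foldl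
    (fun st i =>
      let k := kmpStep s st.1 (s.getD i.toNat default) st.2
      (st.1.set! i.toNat k, k))
    ((List.replicate s.length 0).toArray, 0)

def partial_match_py_alt (buffer : String) (string : String) (safe_size : Int) : String × String :=
  let buf := buffer.toList
  let s := string.toList
  let start_pos : Int := max 0 ((buf.length : Int) - safe_size)
  let pos := PySem.Chars.findFrom buf s start_pos none
  if pos ≥ 0 then
    (String.ofList (PySem.List.slice buf (some 0) (some pos)),
     String.ofList (PySem.List.slice buf (some pos) none))
  else
    let fail := (buildFail s).1
    let k := buf.foldl (fun k c => kmpStep s fail c k) 0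
    (String.ofList (PySem.List.slice buf (some 0) (some ((buf.length : Int) - k))),
     String.ofList (PySem.List.slice buf (some ((buf.length : Int) - k)) none))

-- ===== PRECONDITION & SPEC =====
def Spec_partial_match_py (buffer : String) (string : String) (safe_size : Int) (out : String × String) : Prop := out = partial_match_py_alt buffer string safe_size
instance (buffer : String) (string : String) (safe_size : Int) (out : String × String) : Decidable (Spec_partial_match_py buffer string safe_size out) := by unfold Spec_partial_match_py; infer_instance

-- ===== CLAIM (what is proved, stated in full; the proofs are below) =====
def Claim_equal_partial_match_py : Prop := ∀ (buffer : String) (string : String) (safe_size : Int), Dom_partial_match_py buffer string safe_size → Spec_partial_match_py buffer string safe_size (partial_match_py buffer string safe_size)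

-- ===== LEMMAS AND PROOFS =====

-- the longest j ≤ b such that s.take j is a suffix of t (the quantity both loops compute)
def kmpG (s t : List Char) (b : Nat) : Nat := Nat.findGreatest (fun j => s.take j <:+ t) b

lemma suffix_snoc_iff (u t : List Char) (a c : Char) :
    u ++ [a] <:+ t ++ [c] ↔ a = c ∧ u <:+ t := by
  constructor
  · rintro ⟨p, hp⟩
    rw [← List.append_assoc] at hp
    rcases List.append_inj' hp rfl with ⟨h1, h2⟩
    exact ⟨by injection h2, ⟨p, h1⟩⟩
  · rintro ⟨rfl, p, rfl⟩
    exact ⟨p, by simp⟩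

lemma take_succ_suffix_snoc (s t : List Char) (c : Char) (j : Nat) (hj : j < s.length) :
    (s.take (j + 1) <:+ t ++ [c]) ↔ (s.take j <:+ t ∧ s.getD j default = c) := by
  rw [List.take_succ_eq_append_getElem hj, suffix_snoc_iff, List.getD_eq_getElem s default hj]
  tauto

lemma take_suffix_take (s t : List Char) (j k : Nat) (hjk : j ≤ k)
    (h1 : s.take j <:+ t) (h2 : s.take k <:+ t) : s.take j <:+ s.take k := by
  exact List.suffix_of_suffix_length_le h1 h2 (by simp; omega)

lemma kmpG_suffix (s t : List Char) (b : Nat) : s.take (kmpG s t b) <:+ t := by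
  have h0 : s.take 0 <:+ t := by simp
  exact Nat.findGreatest_spec (P := fun j => s.take j <:+ t) (Nat.zero_le b) h0

lemma kmpFall_correct (s t : List Char) (fail : Array Nat) (c : Char) (cap : Nat)
    (hcapm : cap ≤ s.length)
    (hf : ∀ i, i < cap → fail.getD i 0 = kmpG s (s.take (i + 1)) i) :
    ∀ k, s.take k <:+ t → k ≤ s.length → k ≤ cap →
      (∀ j, j < cap → s.take j <:+ t → s.getD j default = c → j ≤ k) →
      (s.take (kmpFall s fail c k) <:+ t ∧ kmpFall s fail c k ≤ k ∧
       (∀ j, j < cap → s.take j <:+ t → s.getD j default = c → j ≤ kmpFall s fail c k) ∧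
       (kmpFall s fail c k = 0 ∨
         (kmpFall s fail c k < s.length ∧ c = s.getD (kmpFall s fail c k) default))) := by
  intro k
  induction k using Nat.strong_induction_on with
  | _ k IH =>
    intro hsuf hkm hkcap hmax
    rw [kmpFall]
    by_cases hc : k ≠ 0 ∧ (k = s.length ∨ ¬ c = s.getD k default)
    · simp only [if_pos hc]
      have hk1 : k - 1 < cap := by omega
      have hfk : fail.getD (k - 1) 0 = kmpG s (s.take k) (k - 1) := by
        have := hf (k - 1) hk1
        simpa [Nat.sub_add_cancel (by omega : 1 ≤ k)] using this
      have hk2le : fail.getD (k - 1) 0 ≤ k - 1 := by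
        rw [hfk]; exact Nat.findGreatest_le _
      have hlt : fail.getD (k - 1) 0 < k := by omega
      rw [dif_pos hlt]
      have hsuf2 : s.take (fail.getD (k - 1) 0) <:+ t := by
        rw [hfk]
        exact (kmpG_suffix s (s.take k) (k - 1)).trans hsuf
      have hmax2 : ∀ j, j < cap → s.take j <:+ t → s.getD j default = c →
          j ≤ fail.getD (k - 1) 0 := by
        intro j hjc hjs hje
        have hjk : j ≤ k := hmax j hjc hjs hje
        have hjne : j ≠ k := by
          rcases hc.2 with h | h
          · omega
          · intro he; exact h (by rw [he] at hje; exact hje.symm)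
        have hjlt : j < k := by omega
        have : s.take j <:+ s.take k :=
          take_suffix_take s t j k (by omega) hjs hsuf
        rw [hfk]
        exact Nat.le_findGreatest (by omega) this
      obtain ⟨ha, hb, hcx, hd⟩ := IH _ hlt hsuf2 (by omega) (by omega) hmax2
      exact ⟨ha, le_trans hb (by omega), hcx, hd⟩
    · simp only [if_neg hc]
      refine ⟨hsuf, le_refl _, hmax, ?_⟩
      by_cases hk0 : k = 0
      · exact Or.inl hk0
      · have hc2 : ¬ (k = s.length ∨ ¬ c = s.getD k default) := fun h => hc ⟨hk0, h⟩
        have h1 : k ≠ s.length := fun h => hc2 (Or.inl h)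
        have h2 : c = s.getD k default := not_not.mp fun h => hc2 (Or.inr h)
        exact Or.inr ⟨by omega, h2⟩

lemma kmpStep_correct (s t : List Char) (fail : Array Nat) (c : Char) (cap : Nat)
    (hcapm : cap ≤ s.length)
    (hf : ∀ i, i < cap → fail.getD i 0 = kmpG s (s.take (i + 1)) i)
    (k : Nat) (hsuf : s.take k <:+ t) (hkm : k ≤ s.length) (hkcap : k ≤ cap)
    (hmax : ∀ j, j < cap → s.take j <:+ t → s.getD j default = c → j ≤ k)
    (hx : k < cap ∨ cap = s.length) :
    kmpStep s fail c k = kmpG s (t ++ [c]) cap := by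
  obtain ⟨h1, h2, h3, h4⟩ := kmpFall_correct s t fail c cap hcapm hf k hsuf hkm hkcap hmax
  set k' := kmpFall s fail c k with hk'
  unfold kmpStep
  rw [← hk']
  by_cases hic : k' < s.length ∧ c = s.getD k' default
  · rw [if_pos hic]
    have hcap' : k' + 1 ≤ cap := by
      rcases hx with h | h
      · omega
      · omega
    symm
    rw [kmpG, Nat.findGreatest_eq_iff]
    refine ⟨hcap', fun _ => ?_, ?_⟩
    · rw [take_succ_suffix_snoc s t c k' hic.1]
      exact ⟨h1, hic.2.symm⟩
    · intro n hn hncap hP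
      obtain ⟨j, rfl⟩ : ∃ j, n = j + 1 := ⟨n - 1, by omega⟩
      rw [take_succ_suffix_snoc s t c j (by omega)] at hP
      have := h3 j (by omega) hP.1 hP.2
      omega
  · rw [if_neg hic]
    have hk0 : k' = 0 := by
      rcases h4 with h | h
      · exact h
      · exact absurd ⟨h.1, h.2⟩ hic
    rw [hk0]
    symm
    rw [kmpG, Nat.findGreatest_eq_iff]
    refine ⟨Nat.zero_le _, fun h => absurd rfl h, ?_⟩
    intro n hn hncap hP
    obtain ⟨j, rfl⟩ : ∃ j, n = j + 1 := ⟨n - 1, by omega⟩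
    rw [take_succ_suffix_snoc s t c j (by omega)] at hP
    have hj0 : j = 0 := by have := h3 j (by omega) hP.1 hP.2; omega
    subst hj0
    refine hic ?_
    rw [hk0]
    exact ⟨by omega, hP.2.symm⟩

lemma kmpG_le (s t : List Char) (b : Nat) : kmpG s t b ≤ b := Nat.findGreatest_le _

-- the step function of buildFail's fold, named for the proofs below
def bfF (s : List Char) : Array Nat × Nat → Int → Array Nat × Nat :=
  fun st i =>
    let k := kmpStep s st.1 (s.getD i.toNat default) st.2
    (st.1.set! i.toNat k, k)

lemma buildFail_eq (s : List Char) :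
    buildFail s = (PySem.List.pyRange 1 (s.length : Int) 1).foldl (bfF s)
      ((List.replicate s.length 0).toArray, 0) := rfl

lemma buildFail_inv (s : List Char) (j : Nat) (hj1 : 1 ≤ j) (hjm : j ≤ s.length) :
    ((PySem.List.pyRange 1 (j : Int) 1).foldl (bfF s)
        ((List.replicate s.length 0).toArray, 0)).1.size = s.length ∧
    ((PySem.List.pyRange 1 (j : Int) 1).foldl (bfF s)
        ((List.replicate s.length 0).toArray, 0)).2 = kmpG s (s.take j) (j - 1) ∧
    (∀ i, i < j →
      ((PySem.List.pyRange 1 (j : Int) 1).foldl (bfF s)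
          ((List.replicate s.length 0).toArray, 0)).1.getD i 0 = kmpG s (s.take (i + 1)) i) := by
  revert hjm
  induction j, hj1 using Nat.le_induction with
  | base =>
    intro hjm
    rw [show ((1 : Nat) : Int) = 1 from rfl,
        show PySem.List.pyRange 1 (1 : Int) 1 = [] from by decide]
    simp only [List.foldl_nil]
    refine ⟨by simp, by simp [kmpG], ?_⟩
    intro i hi
    have hi0 : i = 0 := by omega
    subst hi0
    simp [Array.getD, kmpG]
  | succ j hj IH =>
    intro hjm
    have hjlen : j < s.length := by omega
    rw [show ((j + 1 : Nat) : Int) = ((j : Nat) : Int) + 1 from by push_cast; ring,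
        PySem.List.pyRange_one_succ_right (by exact_mod_cast hj), List.foldl_append]
    obtain ⟨IH1, IH2, IH3⟩ := IH (by omega)
    set st := (PySem.List.pyRange 1 ((j : Nat) : Int) 1).foldl (bfF s)
      ((List.replicate s.length 0).toArray, 0) with hst
    simp only [List.foldl_cons, List.foldl_nil]
    have htoNat : ((j : Nat) : Int).toNat = j := by omega
    have hk : (bfF s st ((j : Nat) : Int)).2 = kmpG s (s.take (j + 1)) j := by
      simp only [bfF, htoNat]
      rw [IH2]
      have hstep := kmpStep_correct s (s.take j) st.1 (s.getD j default) j hjlen.le IH3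
        (kmpG s (s.take j) (j - 1)) (kmpG_suffix _ _ _)
        (le_trans (kmpG_le _ _ _) (by omega)) (le_trans (kmpG_le _ _ _) (by omega))
        (fun j' hj' hsuf' _ => Nat.le_findGreatest (by omega) hsuf')
        (Or.inl (by have := kmpG_le s (s.take j) (j - 1); omega))
      rw [hstep]
      congr 1
      rw [List.getD_eq_getElem s default hjlen, ← List.take_succ_eq_append_getElem hjlen]
    have hfst : (bfF s st ((j : Nat) : Int)).1
        = st.1.set! j (kmpG s (s.take (j + 1)) j) := by
      have h := hk
      simp only [bfF, htoNat] at h ⊢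
      rw [h]
    refine ⟨?_, ?_, ?_⟩
    · rw [hfst, Array.size_set!, IH1]
    · simpa using hk
    · intro i hi
      rw [hfst]
      rcases Nat.lt_or_ge i j with hij | hij
      · have hilen : i < st.1.size := by omega
        have := IH3 i hij
        simpa [Array.getD, hilen, Array.getElem_setIfInBounds_ne hilen (by omega : j ≠ i)]
          using this
      · have hieq : i = j := by omega
        subst hieq
        have hilen : i < st.1.size := by omega
        simp [Array.getD, hilen]

lemma buildFail_spec (s : List Char) :
    ∀ i, i < s.length → (buildFail s).1.getD i 0 = kmpG s (s.take (i + 1)) i := by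
  intro i hi
  rw [buildFail_eq]
  exact (buildFail_inv s s.length (by omega) (le_refl _)).2.2 i hi

lemma scan_correct (s buf : List Char) (fail : Array Nat)
    (hf : ∀ i, i < s.length → fail.getD i 0 = kmpG s (s.take (i + 1)) i) :
    buf.foldl (fun k c => kmpStep s fail c k) 0 = kmpG s buf s.length := by
  induction buf using List.reverseRecOn with
  | nil =>
    simp only [List.foldl_nil]
    symm
    rw [kmpG, Nat.findGreatest_eq_iff]
    refine ⟨Nat.zero_le _, fun h => absurd rfl h, ?_⟩
    intro n hn hnm hP
    have h1 : s.take n = [] := List.suffix_nil.mp hP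
    have h2 : min n s.length = 0 := by simpa using congrArg List.length h1
    omega
  | append_singleton t c IH =>
    rw [List.foldl_append]
    simp only [List.foldl]
    rw [IH]
    apply kmpStep_correct s t fail c s.length (le_refl _) hf
    · exact kmpG_suffix s t s.length
    · exact Nat.findGreatest_le _
    · exact Nat.findGreatest_le _
    · intro j hj hjs _
      exact Nat.le_findGreatest (by omega) hjs
    · exact Or.inr rfl

lemma condA_iff (buf pre : List Char) :
    pyStartswithFrom buf pre ((buf.length : Int) - pre.length) = true ↔ pre <:+ buf := by
  unfold pyStartswithFrom
  by_cases hk : pre.length ≤ buf.length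
  · simp only [if_neg (show ¬ ((buf.length : Int) - pre.length < 0) from by omega)]
    rw [if_pos (show (buf.length : Int) - pre.length ≤ (buf.length : Int) from by omega)]
    rw [show ((buf.length : Int) - pre.length).toNat = buf.length - pre.length from by omega]
    rw [List.isPrefixOf_iff_prefix]
    constructor
    · intro h
      have hlen : (buf.drop (buf.length - pre.length)).length ≤ pre.length := by
        simp [List.length_drop]
        omega
      rw [h.eq_of_length_le hlen]
      exact List.drop_suffix _ _
    · rintro ⟨p, rfl⟩
      rw [show (p ++ pre).length - pre.length = p.length from by simp]
      rw [List.drop_left]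
  · simp only [if_pos (show (buf.length : Int) - pre.length < 0 from by omega)]
    rw [if_pos (show max 0 ((buf.length : Int) - pre.length + buf.length) ≤ (buf.length : Int)
      from by omega)]
    constructor
    · intro h
      exfalso
      have hp := (List.isPrefixOf_iff_prefix.mp h).length_le
      simp [List.length_drop] at hp
      omega
    · intro h
      exact absurd h.length_le (by omega)

lemma aShrink_eq (buf s : List Char) :
    ∀ j, j ≤ s.length → aShrink buf (s.take j) = s.take (kmpG s buf j) := by
  intro j
  induction j using Nat.strong_induction_on with
  | _ j IH =>
    intro hjm
    rw [aShrink]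
    by_cases h : s.take j <:+ buf
    · rw [if_pos ((condA_iff buf (s.take j)).2 h)]
      rw [kmpG, Nat.findGreatest_eq h]
    · have hcond : ¬ (pyStartswithFrom buf (s.take j) ((buf.length : Int) - (s.take j).length) = true) := by
        rw [condA_iff]; exact h
      rw [if_neg hcond]
      have hj0 : j ≠ 0 := by
        intro he; apply h; rw [he]; simp
      obtain ⟨j0, rfl⟩ : ∃ j0, j = j0 + 1 := ⟨j - 1, by omega⟩
      have hlen : (s.take (j0 + 1)).length = j0 + 1 := by simp; omega
      have hslice : PySem.List.slice (s.take (j0 + 1)) none (some (((s.take (j0 + 1)).length : Int) - 1))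
          = s.take j0 := by
        rw [hlen]
        have : ((j0 + 1 : Nat) : Int) - 1 = ((j0 : Nat) : Int) := by push_cast; ring
        rw [this, PySem.List.slice_to_natCast, List.take_take]
        congr 1
        omega
      rw [hslice]
      rw [IH j0 (by omega) (by omega)]
      have : kmpG s buf (j0 + 1) = kmpG s buf j0 := by
        rw [kmpG, Nat.findGreatest_succ, if_neg h]
        rfl
      rw [this]

-- ===== VERDICT (by name: the statement is the Claim_ definition above) =====
theorem partial_match_py_spec : Claim_equal_partial_match_py := by
  intro buffer string safe_size _dom
  show partial_match_py buffer string safe_size = partial_match_py_alt buffer string safe_size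
  unfold partial_match_py partial_match_py_alt
  by_cases hpos : PySem.Chars.findFrom buffer.toList string.toList
      (max 0 ((buffer.toList.length : Int) - safe_size)) none ≥ 0
  · simp only [if_pos hpos]
  · simp only [if_neg hpos]
    have hA : aShrink buffer.toList string.toList
        = string.toList.take (kmpG string.toList buffer.toList string.toList.length) := by
      have h := aShrink_eq buffer.toList string.toList string.toList.length (le_refl _)
      rwa [List.take_length] at h
    have hscan : buffer.toList.foldl
        (fun k c => kmpStep string.toList (buildFail string.toList).1 c k) 0
        = kmpG string.toList buffer.toList string.toList.length :=
      scan_correct _ _ _ (buildFail_spec string.toList)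
    obtain ⟨G, hGdef⟩ : ∃ g, kmpG string.toList buffer.toList string.toList.length = g :=
      ⟨_, rfl⟩
    rw [hGdef] at hA hscan
    rw [hA, hscan]
    have hGm : G ≤ string.toList.length := hGdef ▸ kmpG_le _ _ _
    have hsuf : string.toList.take G <:+ buffer.toList := hGdef ▸ kmpG_suffix _ _ _
    have hGL : G ≤ buffer.toList.length := by
      have h1 := hsuf.length_le
      rw [List.length_take] at h1
      omega
    by_cases hG0 : G = 0
    · rw [hG0]
      simp only [List.take_zero, ne_eq, not_true_eq_false, if_false, Nat.cast_zero, sub_zero]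
      rw [show ((buffer.toList.length : Int)) = ((buffer.toList.length : Nat) : Int) from rfl]
      rw [PySem.List.slice_zero_start, PySem.List.slice_to_natCast,
          PySem.List.slice_from_natCast, List.take_length, List.drop_length]
    · have hpre : string.toList.take G ≠ [] := by
        intro he
        have hcl := congrArg List.length he
        simp only [List.length_take, List.length_nil] at hcl
        omega
      rw [if_pos hpre]
      rw [show (string.toList.take G).length = G from by rw [List.length_take]; omega]
      rw [PySem.List.slice_to_neg_natCast buffer.toList G (by omega),
          PySem.List.slice_from_neg_natCast buffer.toList G (by omega),
          PySem.List.slice_zero_start,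
          PySem.List.slice_to buffer.toList (by omega : (0 : Int) ≤ (buffer.toList.length : Int) - G),
          PySem.List.slice_from buffer.toList (by omega : (0 : Int) ≤ (buffer.toList.length : Int) - G)]
      rw [show ((buffer.toList.length : Int) - G).toNat = buffer.toList.length - G from by omega]
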